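-- pv_equiv track=rewrite | github.com/zongyang078/pawpal-agent | agent.py | _guess_priority
-- ===== SOURCE A (Python) =====
-- def _guess_priority(description: str) -> str:
--     """Guess task priority based on description."""
--     desc = description.lower()
--     if any(w in desc for w in ["vet", "medication", "medicine", "emergency"]):
--         return "high"
--     if any(w in desc for w in ["feed", "walk"]):
--         return "high"
--     if any(w in desc for w in ["groom", "bath", "train"]):
--         return "medium"
--     return "medium"
-- ===== SOURCE B (Python) =====
-- _HIGH = ("vet", "medication", "medicine", "emergency", "feed", "walk")
--
-- def _guess_priority(description: str) -> str:
--     """Guess task priority based on description."""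
--     desc = description.lower()
--     for i in range(len(desc)):
--         for w in _HIGH:
--             if desc.startswith(w, i):
--                 return "high"
--     return "medium"
-- ===== Notes on version B (the rewrite author's own statement) =====
-- stated objective: alternative
-- what changed: Replaced A's keyword-major substring searches (one full 'in' scan per keyword) by a single position-major scan: walk the lowered string once and at each position test the keywords as prefixes, returning 'high' at the first match; A's third branch is dropped since it returns the fallback 'medium' anyway.
import Mathlib
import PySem

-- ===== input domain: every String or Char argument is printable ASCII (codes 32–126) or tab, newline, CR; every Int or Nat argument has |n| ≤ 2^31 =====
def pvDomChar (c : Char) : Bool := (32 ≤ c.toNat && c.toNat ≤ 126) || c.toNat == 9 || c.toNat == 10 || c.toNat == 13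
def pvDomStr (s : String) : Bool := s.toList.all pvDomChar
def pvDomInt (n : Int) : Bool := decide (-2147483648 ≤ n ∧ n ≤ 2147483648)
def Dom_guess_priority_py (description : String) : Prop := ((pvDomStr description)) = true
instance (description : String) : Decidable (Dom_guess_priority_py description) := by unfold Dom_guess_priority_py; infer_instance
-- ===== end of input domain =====

-- B replaces A's keyword-major 'in' searches by one position-major prefix scan (alternative decomposition; same cost).

-- ===== PORT A =====
def guess_priority_py (description : String) : String :=
  let desc := PySem.Str.lower description
  if (["vet", "medication", "medicine", "emergency"].any fun w => PySem.Str.isIn w desc) then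
    "high"
  else if (["feed", "walk"].any fun w => PySem.Str.isIn w desc) then
    "high"
  else if (["groom", "bath", "train"].any fun w => PySem.Str.isIn w desc) then
    "medium"
  else
    "medium"

-- ===== PORT B =====
-- Source B's keyword tuple
def pvHighB : List (List Char) :=
  ["vet".toList, "medication".toList, "medicine".toList, "emergency".toList, "feed".toList, "walk".toList]

-- Source B's position loop: at each suffix (position i) test each keyword as a prefix
def pvScanB : List Char → Bool
  | [] => false
  | c :: rest => (pvHighB.any fun w => w.isPrefixOf (c :: rest)) || pvScanB rest

def guess_priority_py_alt (description : String) : String :=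
  let desc := PySem.Str.lower description
  if pvScanB desc.toList then "high" else "medium"

-- ===== PRECONDITION & SPEC =====
def Spec_guess_priority_py (description : String) (out : String) : Prop := out = guess_priority_py_alt description
instance (description : String) (out : String) : Decidable (Spec_guess_priority_py description out) := by unfold Spec_guess_priority_py; infer_instance

-- ===== CLAIM (what is proved, stated in full; the proofs are below) =====
def Claim_equal_guess_priority_py : Prop := ∀ (description : String), Dom_guess_priority_py description → Spec_guess_priority_py description (guess_priority_py description)

-- ===== LEMMAS AND PROOFS =====
-- the position scan finds exactly the keywords occurring as infixes
theorem pvScanB_iff (cs : List Char) :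
    pvScanB cs = true ↔ ∃ w ∈ pvHighB, w <:+: cs := by
  induction cs with
  | nil =>
    simp [pvScanB, pvHighB]
  | cons c rest ih =>
    simp only [pvScanB, Bool.or_eq_true, List.any_eq_true, ih]
    constructor
    · rintro (⟨w, hw, hp⟩ | ⟨w, hw, hi⟩)
      · exact ⟨w, hw, (List.IsPrefix.isInfix (List.isPrefixOf_iff_prefix.mp hp))⟩
      · exact ⟨w, hw, List.infix_cons_iff.mpr (Or.inr hi)⟩
    · rintro ⟨w, hw, hi⟩
      rcases List.infix_cons_iff.mp hi with hp | hi'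
      · exact Or.inl ⟨w, hw, List.isPrefixOf_iff_prefix.mpr hp⟩
      · exact Or.inr ⟨w, hw, hi'⟩

-- ===== VERDICT (by name: the statement is the Claim_ definition above) =====
theorem guess_priority_py_spec : Claim_equal_guess_priority_py := by
  intro d _
  unfold Spec_guess_priority_py guess_priority_py guess_priority_py_alt
  simp only [List.any_cons, List.any_nil, Bool.or_false, PySem.Str.isIn, pvScanB_iff, pvHighB]
  split_ifs <;> simp_all [PySem.Chars.isIn_iff_infix]
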